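-- pv_equiv track=rewrite | github.com/dpinner/aoc2024 | 14/main.py | easter_egg
-- ===== SOURCE A (Python) =====
-- from collections import deque
--
-- def move(pos, vel, moves, width, height):
--     return [
--         ((p[0] + moves * v[0]) % width, (p[1] + moves * v[1]) % height)
--         for p, v in zip(pos, vel)
--     ]
--
-- def easter_egg(pos, vel, max_moves, width, height):
--     min_disconnected = len(pos)
--     idx = 0
--     dirs = [(0, 1), (-1, 0), (0, -1), (1, 0), (1, 1), (1, -1), (-1, 1), (-1, -1)]
--     for i in range(max_moves):
--         seen = set()
--         disconnected = 0
--         new_pos = set(move(pos, vel, i, width, height))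
--         for p in new_pos:
--             if p in seen:
--                 continue
--             q = deque([p])
--             while q:
--                 x = q.popleft()
--                 if x in seen:
--                     continue
--                 seen.add(x)
--                 ns = [(x[0] + d[0], x[1] + d[1]) for d in dirs]
--                 if not any(n in new_pos for n in ns):
--                     disconnected += 1
--                 q += [n for n in ns if n in new_pos]
--         if disconnected < min_disconnected:
--             min_disconnected = disconnected
--             idx = i
--
--     return idx
-- ===== SOURCE B (Python) =====
-- def easter_egg(pos, vel, max_moves, width, height):
--     # Same answer as A, but without the flood-fill: a robot is "disconnected"
--     # iff none of its 8 neighbours is occupied, so count those directly.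
--     # Positions are advanced incrementally (one vector add per step).
--     dirs = ((0, 1), (-1, 0), (0, -1), (1, 0), (1, 1), (1, -1), (-1, 1), (-1, -1))
--     cur = [p for p, _ in zip(pos, vel)]
--     best = len(pos)
--     idx = 0
--     for i in range(max_moves):
--         pts = {(x % width, y % height) for x, y in cur}
--         iso = 0
--         for x, y in pts:
--             if all((x + dx, y + dy) not in pts for dx, dy in dirs):
--                 iso += 1
--         if iso < best:
--             best = iso
--             idx = i
--         cur = [(x + vx, y + vy) for (x, y), (vx, vy) in zip(cur, vel)]
--     return idx
-- ===== Notes on version B (the rewrite author's own statement) =====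
-- stated objective: alternative
-- what changed: The per-step BFS flood fill over a deque and seen-set is replaced by a direct 8-neighbour isolation count over the position set, and positions are advanced incrementally by one vector addition per step instead of recomputing p + i*v each step.
import Mathlib
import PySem

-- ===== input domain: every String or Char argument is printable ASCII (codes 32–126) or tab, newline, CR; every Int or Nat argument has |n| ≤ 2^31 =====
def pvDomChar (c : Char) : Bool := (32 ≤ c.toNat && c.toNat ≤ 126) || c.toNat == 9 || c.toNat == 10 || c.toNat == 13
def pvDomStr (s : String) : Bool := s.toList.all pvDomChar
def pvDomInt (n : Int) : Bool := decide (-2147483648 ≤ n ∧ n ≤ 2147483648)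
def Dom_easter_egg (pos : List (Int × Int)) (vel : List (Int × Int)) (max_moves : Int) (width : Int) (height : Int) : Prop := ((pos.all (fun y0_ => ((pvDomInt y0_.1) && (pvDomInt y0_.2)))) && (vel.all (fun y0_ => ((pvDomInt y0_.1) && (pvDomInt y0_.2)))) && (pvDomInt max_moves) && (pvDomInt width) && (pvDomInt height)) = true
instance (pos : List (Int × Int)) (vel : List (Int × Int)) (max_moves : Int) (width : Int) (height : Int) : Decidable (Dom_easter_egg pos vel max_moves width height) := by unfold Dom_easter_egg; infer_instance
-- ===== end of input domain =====

-- B replaces A's per-step BFS flood fill (a robot is "disconnected" iff none of its 8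
-- neighbours is occupied, so B counts those directly) and advances positions
-- incrementally by one vector addition per step; same asymptotic cost.

-- ===== PORT A =====
def pyMove (pos vel : List (Int × Int)) (moves width height : Int) : List (Int × Int) :=
  (pos.zip vel).map (fun pv =>
    (PySem.Int.mod (pv.1.1 + moves * pv.2.1) width,
     PySem.Int.mod (pv.1.2 + moves * pv.2.2) height))

-- the 8 neighbour offsets (the same literal appears in both Pythons)
def dirs8 : List (Int × Int) := [(0,1),(-1,0),(0,-1),(1,0),(1,1),(1,-1),(-1,1),(-1,-1)]

-- the 'while q' deque loop; fuel is a termination guard only (9*|new_pos|+1 always suffices)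
def bfsA (new_pos : PySem.Set (Int × Int)) :
    Nat → List (Int × Int) → PySem.Set (Int × Int) → Int → PySem.Set (Int × Int) × Int
  | 0, _, seen, disc => (seen, disc)
  | _ + 1, [], seen, disc => (seen, disc)
  | fuel + 1, x :: q, seen, disc =>
    if PySem.Set.contains seen x then bfsA new_pos fuel q seen disc
    else
      let seen' := PySem.Set.add seen x
      let ns := dirs8.map (fun d => (x.1 + d.1, x.2 + d.2))
      let disc' := if ns.any (fun n => PySem.Set.contains new_pos n) then disc else disc + 1
      bfsA new_pos fuel (q ++ ns.filter (fun n => PySem.Set.contains new_pos n)) seen' disc'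

def stepA (pos vel : List (Int × Int)) (width height : Int) (st : Int × Int) (i : Int) :
    Int × Int :=
  let new_pos : PySem.Set (Int × Int) := PySem.Set.ofList (pyMove pos vel i width height)
  let r := new_pos.foldl
    (fun (sd : PySem.Set (Int × Int) × Int) p =>
      if PySem.Set.contains sd.1 p then sd
      else bfsA new_pos (9 * new_pos.length + 1) [p] sd.1 sd.2)
    (PySem.Set.empty, 0)
  if r.2 < st.1 then (r.2, i) else st

def easter_egg (pos : List (Int × Int)) (vel : List (Int × Int)) (max_moves : Int) (width : Int) (height : Int) : Int :=
  ((PySem.List.pyRange 0 max_moves 1).foldl (stepA pos vel width height)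
    ((pos.length : Int), 0)).2

-- ===== PORT B =====

def stepB (vel : List (Int × Int)) (width height : Int)
    (st : (Int × Int) × List (Int × Int)) (i : Int) : (Int × Int) × List (Int × Int) :=
  let cur := st.2
  let pts : PySem.Set (Int × Int) :=
    PySem.Set.ofList (cur.map (fun c => (PySem.Int.mod c.1 width, PySem.Int.mod c.2 height)))
  let iso : Int := pts.foldl
    (fun acc c =>
      if dirs8.all (fun d => !(PySem.Set.contains pts (c.1 + d.1, c.2 + d.2))) then acc + 1
      else acc) 0
  let best := if iso < st.1.1 then (iso, i) else st.1
  (best, (cur.zip vel).map (fun cv => (cv.1.1 + cv.2.1, cv.1.2 + cv.2.2)))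

def easter_egg_alt (pos : List (Int × Int)) (vel : List (Int × Int)) (max_moves : Int) (width : Int) (height : Int) : Int :=
  (((PySem.List.pyRange 0 max_moves 1).foldl (stepB vel width height)
      (((pos.length : Int), 0), (pos.zip vel).map (fun pv => pv.1))).1).2

-- ===== PRECONDITION & SPEC =====
-- Pre_ excludes exactly the inputs where Python A raises ZeroDivisionError: width or
-- height 0 while at least one step is taken on a nonempty zip(pos, vel) (B raises there too).
def Pre_easter_egg (pos : List (Int × Int)) (vel : List (Int × Int)) (max_moves : Int) (width : Int) (height : Int) : Prop :=
  max_moves ≤ 0 ∨ pos = [] ∨ vel = [] ∨ (width ≠ 0 ∧ height ≠ 0)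
instance (pos : List (Int × Int)) (vel : List (Int × Int)) (max_moves : Int) (width : Int) (height : Int) : Decidable (Pre_easter_egg pos vel max_moves width height) := by unfold Pre_easter_egg; infer_instance

def pvWitness_easter_egg : (List (Int × Int)) × (List (Int × Int)) × Int × Int × Int :=
  ([(0, 0), (5, 3), (2, 2)], [(1, 1), (0, 1), (2, -1)], 4, 7, 5)

def Spec_easter_egg (pos : List (Int × Int)) (vel : List (Int × Int)) (max_moves : Int) (width : Int) (height : Int) (out : Int) : Prop := out = easter_egg_alt pos vel max_moves width height
instance (pos : List (Int × Int)) (vel : List (Int × Int)) (max_moves : Int) (width : Int) (height : Int) (out : Int) : Decidable (Spec_easter_egg pos vel max_moves width height out) := by unfold Spec_easter_egg; infer_instance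

-- ===== CLAIM (what is proved, stated in full; the proofs are below) =====
def Claim_equal_easter_egg : Prop := ∀ (pos : List (Int × Int)) (vel : List (Int × Int)) (max_moves : Int) (width : Int) (height : Int), Dom_easter_egg pos vel max_moves width height → Pre_easter_egg pos vel max_moves width height → Spec_easter_egg pos vel max_moves width height (easter_egg pos vel max_moves width height)

-- ===== LEMMAS AND PROOFS =====

-- B's isolation test, as a predicate
def isoP (S : PySem.Set (Int × Int)) (c : Int × Int) : Bool :=
  dirs8.all (fun d => !(PySem.Set.contains S (c.1 + d.1, c.2 + d.2)))

-- positions after i steps (B's running state)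
def curAt (pos vel : List (Int × Int)) (i : Int) : List (Int × Int) :=
  (pos.zip vel).map (fun pv => (pv.1.1 + i * pv.2.1, pv.1.2 + i * pv.2.2))

-- A's outer for-p loop over the position set
def runA (S : PySem.Set (Int × Int)) (l : List (Int × Int))
    (sd : PySem.Set (Int × Int) × Int) : PySem.Set (Int × Int) × Int :=
  l.foldl (fun (sd : PySem.Set (Int × Int) × Int) p =>
      if PySem.Set.contains sd.1 p then sd
      else bfsA S (9 * S.length + 1) [p] sd.1 sd.2) sd

lemma cond_eq (S : PySem.Set (Int × Int)) (x : Int × Int) :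
    ((dirs8.map (fun d => (x.1 + d.1, x.2 + d.2))).any (fun n => PySem.Set.contains S n))
      = !(isoP S x) := by
  unfold isoP dirs8
  simp

lemma bfsA_spec (S : PySem.Set (Int × Int)) :
    ∀ (fuel : Nat) (q : List (Int × Int)) (seen : PySem.Set (Int × Int)) (disc : Int),
    (∀ x ∈ q, x ∈ S) → seen.Nodup → (∀ x ∈ seen, x ∈ S) →
    disc = ((seen.countP (isoP S) : Nat) : Int) →
    9 * (S.length - seen.length) + q.length ≤ fuel →
    (bfsA S fuel q seen disc).1.Nodup ∧
    (∀ x ∈ (bfsA S fuel q seen disc).1, x ∈ S) ∧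
    (∀ x ∈ seen, x ∈ (bfsA S fuel q seen disc).1) ∧
    (∀ x ∈ q, x ∈ (bfsA S fuel q seen disc).1) ∧
    (bfsA S fuel q seen disc).2 = (((bfsA S fuel q seen disc).1.countP (isoP S) : Nat) : Int) := by
  intro fuel
  induction fuel with
  | zero =>
    intro q seen disc hq hnd hsub hdisc hfuel
    cases q with
    | nil =>
      simp only [bfsA]
      exact ⟨hnd, hsub, fun x hx => hx, by simp, hdisc⟩
    | cons x q' =>
      exfalso
      simp only [List.length_cons] at hfuel
      omega
  | succ fuel ih =>
    intro q seen disc hq hnd hsub hdisc hfuel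
    cases q with
    | nil =>
      simp only [bfsA]
      exact ⟨hnd, hsub, fun x hx => hx, by simp, hdisc⟩
    | cons x q' =>
      simp only [bfsA]
      by_cases hx : PySem.Set.contains seen x = true
      · rw [if_pos hx]
        have hxseen : x ∈ seen := (PySem.Set.contains_iff seen x).mp hx
        have h := ih q' seen disc (fun y hy => hq y (List.mem_cons_of_mem x hy)) hnd hsub hdisc
          (by simp only [List.length_cons] at hfuel; omega)
        exact ⟨h.1, h.2.1, h.2.2.1, fun y hy => by
          rcases List.mem_cons.mp hy with rfl | hy'
          · exact h.2.2.1 y hxseen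
          · exact h.2.2.2.1 y hy', h.2.2.2.2⟩
      · rw [if_neg hx]
        have hxnot : x ∉ seen := fun hm => hx ((PySem.Set.contains_iff seen x).mpr hm)
        have hxS : x ∈ S := hq x List.mem_cons_self
        have hadd : PySem.Set.add seen x = seen ++ [x] := PySem.Set.add_of_not_mem hxnot
        have hnd' : (PySem.Set.add seen x).Nodup := PySem.Set.nodup_add seen x hnd
        have hsub' : ∀ y ∈ PySem.Set.add seen x, y ∈ S := by
          intro y hy
          rcases (PySem.Set.mem_add _ _ _).mp hy with hy' | rfl
          · exact hsub y hy'
          · exact hxS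
        have hlen' : (PySem.Set.add seen x).length ≤ S.length :=
          (List.subperm_of_subset hnd' (fun y hy => hsub' y hy)).length_le
        have hlenadd : (PySem.Set.add seen x).length = seen.length + 1 := by
          rw [hadd]; simp
        have hq'' : ∀ y ∈ q' ++ (dirs8.map (fun d => (x.1 + d.1, x.2 + d.2))).filter
            (fun n => PySem.Set.contains S n), y ∈ S := by
          intro y hy
          rcases List.mem_append.mp hy with hy' | hy'
          · exact hq y (List.mem_cons_of_mem x hy')
          · exact (PySem.Set.contains_iff S y).mp (List.of_mem_filter hy')
        have hdisc' : (if (dirs8.map (fun d => (x.1 + d.1, x.2 + d.2))).any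
              (fun n => PySem.Set.contains S n) then disc else disc + 1)
            = (((PySem.Set.add seen x).countP (isoP S) : Nat) : Int) := by
          rw [cond_eq, hadd, List.countP_append, List.countP_singleton, hdisc]
          cases hiso : isoP S x <;> simp
        have hfuel' : 9 * (S.length - (PySem.Set.add seen x).length) +
            (q' ++ (dirs8.map (fun d => (x.1 + d.1, x.2 + d.2))).filter
              (fun n => PySem.Set.contains S n)).length ≤ fuel := by
          have hfl : ((dirs8.map (fun d => (x.1 + d.1, x.2 + d.2))).filter
              (fun n => PySem.Set.contains S n)).length ≤ 8 := by
            have := List.length_filter_le (fun n => PySem.Set.contains S n)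
              ((dirs8.map (fun d => (x.1 + d.1, x.2 + d.2))))
            simpa [dirs8] using this
          simp only [List.length_append, List.length_cons] at hfuel ⊢
          omega
        have h := ih _ _ _ hq'' hnd' hsub' hdisc' hfuel'
        refine ⟨h.1, h.2.1, ?_, ?_, ?_⟩
        · intro y hy
          exact h.2.2.1 y ((PySem.Set.mem_add _ _ _).mpr (Or.inl hy))
        · intro y hy
          rcases List.mem_cons.mp hy with rfl | hy'
          · exact h.2.2.1 y ((PySem.Set.mem_add _ _ _).mpr (Or.inr rfl))
          · exact h.2.2.2.1 y (List.mem_append.mpr (Or.inl hy'))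
        · exact h.2.2.2.2

lemma runA_spec (S : PySem.Set (Int × Int)) :
    ∀ (l : List (Int × Int)) (seen : PySem.Set (Int × Int)) (disc : Int),
    (∀ x ∈ l, x ∈ S) → seen.Nodup → (∀ x ∈ seen, x ∈ S) →
    disc = ((seen.countP (isoP S) : Nat) : Int) →
    (runA S l (seen, disc)).1.Nodup ∧
    (∀ x ∈ (runA S l (seen, disc)).1, x ∈ S) ∧
    (∀ x ∈ seen, x ∈ (runA S l (seen, disc)).1) ∧
    (∀ x ∈ l, x ∈ (runA S l (seen, disc)).1) ∧
    (runA S l (seen, disc)).2 = (((runA S l (seen, disc)).1.countP (isoP S) : Nat) : Int) := by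
  intro l
  induction l with
  | nil =>
    intro seen disc hl hnd hsub hdisc
    exact ⟨hnd, hsub, fun x hx => hx, by simp, hdisc⟩
  | cons p l ih =>
    intro seen disc hl hnd hsub hdisc
    have hpS : p ∈ S := hl p List.mem_cons_self
    by_cases hp : PySem.Set.contains seen p = true
    · have hrw : runA S (p :: l) (seen, disc) = runA S l (seen, disc) := by
        simp only [runA, List.foldl_cons, hp, if_pos]
      rw [hrw]
      have h := ih seen disc (fun y hy => hl y (List.mem_cons_of_mem p hy)) hnd hsub hdisc
      refine ⟨h.1, h.2.1, h.2.2.1, ?_, h.2.2.2.2⟩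
      intro y hy
      rcases List.mem_cons.mp hy with rfl | hy'
      · exact h.2.2.1 y ((PySem.Set.contains_iff seen y).mp hp)
      · exact h.2.2.2.1 y hy'
    · have hb := bfsA_spec S (9 * S.length + 1) [p] seen disc
        (by intro y hy; rcases List.mem_singleton.mp hy with rfl; exact hpS) hnd hsub hdisc
        (by
          have : seen.length ≤ S.length :=
            (List.subperm_of_subset hnd (fun y hy => hsub y hy)).length_le
          simp only [List.length_singleton]
          omega)
      have hrw : runA S (p :: l) (seen, disc)
          = runA S l (bfsA S (9 * S.length + 1) [p] seen disc) := by
        simp only [runA, List.foldl_cons, hp, if_neg, Bool.false_eq_true, not_false_iff]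
      rw [hrw]
      have h := ih (bfsA S (9 * S.length + 1) [p] seen disc).1
        (bfsA S (9 * S.length + 1) [p] seen disc).2
        (fun y hy => hl y (List.mem_cons_of_mem p hy)) hb.1 hb.2.1 hb.2.2.2.2
      refine ⟨h.1, h.2.1, ?_, ?_, h.2.2.2.2⟩
      · intro y hy
        exact h.2.2.1 y (hb.2.2.1 y hy)
      · intro y hy
        rcases List.mem_cons.mp hy with rfl | hy'
        · exact h.2.2.1 y (hb.2.2.2.1 y (List.mem_singleton_self y))
        · exact h.2.2.2.1 y hy'

lemma runA_count (L : List (Int × Int)) :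
    (runA (PySem.Set.ofList L) (PySem.Set.ofList L) (PySem.Set.empty, 0)).2
      = (((PySem.Set.ofList L).countP (isoP (PySem.Set.ofList L)) : Nat) : Int) := by
  have hnd : (PySem.Set.ofList L).Nodup := PySem.Set.nodup_ofList L
  have h := runA_spec (PySem.Set.ofList L) (PySem.Set.ofList L) PySem.Set.empty 0
    (fun x hx => hx) (by simp [PySem.Set.empty]) (by simp [PySem.Set.empty])
    (by simp [PySem.Set.empty])
  rw [h.2.2.2.2]
  have hperm : (runA (PySem.Set.ofList L) (PySem.Set.ofList L) (PySem.Set.empty, 0)).1.Perm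
      (PySem.Set.ofList L) :=
    (List.perm_ext_iff_of_nodup h.1 hnd).mpr
      (fun a => ⟨fun ha => h.2.1 a ha, fun ha => h.2.2.2.1 a ha⟩)
  rw [hperm.countP_eq]

lemma foldB_count (S : PySem.Set (Int × Int)) :
    (S.foldl (fun (acc : Int) c =>
        if dirs8.all (fun d => !(PySem.Set.contains S (c.1 + d.1, c.2 + d.2))) then acc + 1
        else acc) 0)
      = ((S.countP (isoP S) : Nat) : Int) := by
  have h := PySem.List.foldl_count_if (isoP S) S 0
  simpa [isoP] using h

lemma stepA_eq (pos vel : List (Int × Int)) (width height : Int) (st : Int × Int) (i : Int) :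
    stepA pos vel width height st i
      = (stepB vel width height (st, curAt pos vel i) i).1 := by
  have hlist : (curAt pos vel i).map
      (fun c => (PySem.Int.mod c.1 width, PySem.Int.mod c.2 height))
      = pyMove pos vel i width height := by
    unfold curAt pyMove
    rw [List.map_map]; rfl
  simp only [stepA, stepB, hlist]
  rw [foldB_count]
  have hr : ((PySem.Set.ofList (pyMove pos vel i width height)).foldl
      (fun (sd : PySem.Set (Int × Int) × Int) p =>
        if PySem.Set.contains sd.1 p then sd
        else bfsA (PySem.Set.ofList (pyMove pos vel i width height))
          (9 * (PySem.Set.ofList (pyMove pos vel i width height)).length + 1) [p] sd.1 sd.2)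
      (PySem.Set.empty, 0))
      = runA (PySem.Set.ofList (pyMove pos vel i width height))
          (PySem.Set.ofList (pyMove pos vel i width height)) (PySem.Set.empty, 0) := rfl
  rw [hr, runA_count]

lemma cur_advance (pos vel : List (Int × Int)) (i : Int) :
    ((curAt pos vel i).zip vel).map (fun cv => (cv.1.1 + cv.2.1, cv.1.2 + cv.2.2))
      = curAt pos vel (i + 1) := by
  unfold curAt
  induction pos generalizing vel with
  | nil => simp
  | cons p ps ih =>
    cases vel with
    | nil => simp
    | cons v vs =>
      simp [ih vs]
      constructor <;> ring

lemma outer_eq (pos vel : List (Int × Int)) (width height : Int) :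
    ∀ (n : Nat) (a b : Int), (b - a).toNat = n → ∀ (st : Int × Int),
    (PySem.List.pyRange a b 1).foldl (stepA pos vel width height) st
      = ((PySem.List.pyRange a b 1).foldl (stepB vel width height) (st, curAt pos vel a)).1 := by
  intro n
  induction n with
  | zero =>
    intro a b hab st
    have hba : b ≤ a := by omega
    rw [PySem.List.pyRange_one_eq_nil hba]
    simp
  | succ n ih =>
    intro a b hab st
    have hlt : a < b := by omega
    rw [PySem.List.pyRange_one_cons hlt]
    simp only [List.foldl_cons]
    have hsnd : (stepB vel width height (st, curAt pos vel a) a).2 = curAt pos vel (a + 1) := by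
      simp only [stepB]
      exact cur_advance pos vel a
    have hstep : stepB vel width height (st, curAt pos vel a) a
        = (stepA pos vel width height st a, curAt pos vel (a + 1)) :=
      Prod.ext_iff.mpr ⟨(stepA_eq pos vel width height st a).symm, hsnd⟩
    rw [hstep]
    exact ih (a + 1) b (by omega) (stepA pos vel width height st a)

-- ===== VERDICT (by name: the statement is the Claim_ definition above) =====
theorem easter_egg_spec : Claim_equal_easter_egg := by
  intro pos vel max_moves width height _ _
  unfold Spec_easter_egg easter_egg easter_egg_alt
  rw [outer_eq pos vel width height (max_moves - 0).toNat 0 max_moves rfl]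
  have h0 : curAt pos vel 0 = (pos.zip vel).map (fun pv => pv.1) := by
    unfold curAt; simp
  rw [h0]
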